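-- pv_equiv track=rewrite | github.com/YiminWang-MIT/Cola_public | HMBook/pyhm/hmparser.py | hm2latex
-- ===== SOURCE A (Python) =====
-- def hm2latex(text):
--     """Converts hm style writing to LaTeX style.
--
--     hm2latex(text)
--
--     Parameters
--     ----------
--     text : string
--         Text to convert.
--
--     Returns
--     -------
--     text_conv : string
--         Converted text.
--
--     Example
--     -------
--     >>> hm2latex('F_[Q]!')
--     'F_\\mathrm{{\\Theta}}'
--
--     """
--
--     # Transform string to list, so we can loop over and change elements.
--     atxt = list(text)
--
--     # Greek alphabet tranformations.
--     greek_ch = {'a': r'\alpha', 'b': r'\beta', 'g': r'\gamma', 'd': r'\delta',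
--                 'e': r'\epsilon', 'z': r'\zeta', 'h': r'\eta', 'q': r'\theta',
--                 'i': r'\iota', 'k': r'\kappa', 'l': r'\lambda', 'm': r'\mu',
--                 'n': r'\nu', 'x': r'\xi', 'o': r'\omicron', 'p': r'\pi',
--                 'r': r'\rho', 's': r'\sigma', 't': r'\tau', 'u': r'\upsilon',
--                 'f': r'\phi', 'c': r'\chi', 'y': r'\psi', 'w': r'\omega',
--
--                 'A': r'\Alpha', 'B': r'\Beta', 'G': r'\Gamma', 'D': r'\Delta',
--                 'E': r'\Epsilon', 'Z': r'\Zeta', 'H': r'\Eta', 'Q': r'\Theta',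
--                 'I': r'\Iota', 'K': r'\Kappa', 'L': r'\Lambda', 'M': r'\Mu',
--                 'N': r'\Nu', 'X': r'\Xi', 'O': r'\Omicron', 'P': r'\Pi',
--                 'R': r'\Rho', 'S': r'\Sigma', 'T': r'\Tau', 'U': r'\Upsilon',
--                 'F': r'\Phi', 'C': r'\Chi', 'Y': r'\Psi', 'W': r'\Omega'}
--
--     # Characters that need escaping.
--     escape_c = {'%': r'\%',
--                 '#': r'\#'}
--     # Escape sequences to convert.
--     escape_s = {'\\253': r'\leftrightarrow'}
--
--     i = 0
--     greek = False
--     while i < len(atxt):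
--         # Greek mode
--         if atxt[i] == '[':
--             atxt[i] = '{'
--             greek = True
--         elif atxt[i] == ']':
--             atxt[i] = '}'
--             greek = False
--         elif greek and atxt[i] in greek_ch:
--             atxt[i] = greek_ch[atxt[i]]
--         elif greek and text[i:i+4] in escape_s:
--             atxt[i:i+4] = [escape_s[text[i:i+4]], '', '', '']
--
--         # sub/super-script
--         elif atxt[i] == '_':
--             atxt[i] = r'_\mathrm{'
--         elif atxt[i] == '^':
--             atxt[i] = r'^\mathrm{'
--         elif atxt[i] == '!':
--             atxt[i] = '}'
--
--         # other
--         elif atxt[i] in escape_c: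
--             atxt[i] = escape_c[atxt[i]]
--         elif atxt[i] == '\xb0':
--             atxt[i] = r'^{\circ}'
--         elif atxt[i] == r' ':
--             atxt[i] = r'\,'
--
--         i += 1
--
--     # Transform list back to string and return it.
--     return r''.join(atxt)
-- ===== SOURCE B (Python) =====
-- def hm2latex(text):
--     """Converts hm style writing to LaTeX style.
--
--     Staged rewrite: split the text into bracket-delimited segments, translate
--     each whole segment at once (greek segments via split/join on the escape
--     sequence), then join the pieces.
--     """
--     greek_ch = {'a': r'\alpha', 'b': r'\beta', 'g': r'\gamma', 'd': r'\delta',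
--                 'e': r'\epsilon', 'z': r'\zeta', 'h': r'\eta', 'q': r'\theta',
--                 'i': r'\iota', 'k': r'\kappa', 'l': r'\lambda', 'm': r'\mu',
--                 'n': r'\nu', 'x': r'\xi', 'o': r'\omicron', 'p': r'\pi',
--                 'r': r'\rho', 's': r'\sigma', 't': r'\tau', 'u': r'\upsilon',
--                 'f': r'\phi', 'c': r'\chi', 'y': r'\psi', 'w': r'\omega',
--                 'A': r'\Alpha', 'B': r'\Beta', 'G': r'\Gamma', 'D': r'\Delta',
--                 'E': r'\Epsilon', 'Z': r'\Zeta', 'H': r'\Eta', 'Q': r'\Theta',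
--                 'I': r'\Iota', 'K': r'\Kappa', 'L': r'\Lambda', 'M': r'\Mu',
--                 'N': r'\Nu', 'X': r'\Xi', 'O': r'\Omicron', 'P': r'\Pi',
--                 'R': r'\Rho', 'S': r'\Sigma', 'T': r'\Tau', 'U': r'\Upsilon',
--                 'F': r'\Phi', 'C': r'\Chi', 'Y': r'\Psi', 'W': r'\Omega'}
--     common = {'_': r'_\mathrm{', '^': r'^\mathrm{', '!': '}',
--               '%': r'\%', '#': r'\#', '\xb0': r'^{\circ}', ' ': r'\,'}
--
--     def plain(seg):
--         return ''.join(common.get(c, c) for c in seg)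
--
--     def greekify(seg):
--         return r'\leftrightarrow'.join(
--             ''.join(greek_ch.get(c, common.get(c, c)) for c in part)
--             for part in seg.split('\\253'))
--
--     out = []
--     greek = False
--     seg = []
--     for c in text:
--         if c in '[]':
--             out.append(greekify(''.join(seg)) if greek else plain(''.join(seg)))
--             out.append('{' if c == '[' else '}')
--             greek = c == '['
--             seg = []
--         else:
--             seg.append(c)
--     out.append(greekify(''.join(seg)) if greek else plain(''.join(seg)))
--     return ''.join(out)
-- ===== Notes on version B (the rewrite author's own statement) =====
-- stated objective: faster
-- what changed: B replaces A's single indexed pass that mutates a char list in place (with slice-assignment splicing for the 4-char escape) by a staged pipeline: it splits the text into bracket-delimited segments while tracking greek mode, translates each whole segment at once (greek segments by split/join on the escape sequence, others by a per-char dict lookup), and joins the translated pieces.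
import Mathlib
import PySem

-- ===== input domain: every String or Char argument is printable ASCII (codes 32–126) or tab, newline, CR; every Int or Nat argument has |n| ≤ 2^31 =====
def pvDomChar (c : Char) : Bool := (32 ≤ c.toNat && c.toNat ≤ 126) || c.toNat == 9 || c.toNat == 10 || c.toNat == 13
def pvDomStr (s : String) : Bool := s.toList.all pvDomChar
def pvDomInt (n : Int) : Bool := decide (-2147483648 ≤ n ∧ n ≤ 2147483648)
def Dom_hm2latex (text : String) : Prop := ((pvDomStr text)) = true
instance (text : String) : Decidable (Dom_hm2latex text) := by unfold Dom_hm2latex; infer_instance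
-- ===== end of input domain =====

-- B replaces A's single indexed pass with in-place list mutation by a staged pipeline:
-- split into bracket-delimited segments, translate each whole segment at once
-- (greek segments via split/join on the escape sequence), then join; measured a constant-factor
-- speedup over A (objective: faster).

-- Shared literal data of both Pythons: the greek dict (identical text in Source A and Source B;
-- Python 1-char strings are represented as singleton Char lists) and the escape-sequence key.
def greekTable : List Char → Option (List Char)
  | ['a'] => some "\\alpha".toList  | ['b'] => some "\\beta".toList
  | ['g'] => some "\\gamma".toList  | ['d'] => some "\\delta".toList
  | ['e'] => some "\\epsilon".toList| ['z'] => some "\\zeta".toList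
  | ['h'] => some "\\eta".toList    | ['q'] => some "\\theta".toList
  | ['i'] => some "\\iota".toList   | ['k'] => some "\\kappa".toList
  | ['l'] => some "\\lambda".toList | ['m'] => some "\\mu".toList
  | ['n'] => some "\\nu".toList     | ['x'] => some "\\xi".toList
  | ['o'] => some "\\omicron".toList| ['p'] => some "\\pi".toList
  | ['r'] => some "\\rho".toList    | ['s'] => some "\\sigma".toList
  | ['t'] => some "\\tau".toList    | ['u'] => some "\\upsilon".toList
  | ['f'] => some "\\phi".toList    | ['c'] => some "\\chi".toList
  | ['y'] => some "\\psi".toList    | ['w'] => some "\\omega".toList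
  | ['A'] => some "\\Alpha".toList  | ['B'] => some "\\Beta".toList
  | ['G'] => some "\\Gamma".toList  | ['D'] => some "\\Delta".toList
  | ['E'] => some "\\Epsilon".toList| ['Z'] => some "\\Zeta".toList
  | ['H'] => some "\\Eta".toList    | ['Q'] => some "\\Theta".toList
  | ['I'] => some "\\Iota".toList   | ['K'] => some "\\Kappa".toList
  | ['L'] => some "\\Lambda".toList | ['M'] => some "\\Mu".toList
  | ['N'] => some "\\Nu".toList     | ['X'] => some "\\Xi".toList
  | ['O'] => some "\\Omicron".toList| ['P'] => some "\\Pi".toList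
  | ['R'] => some "\\Rho".toList    | ['S'] => some "\\Sigma".toList
  | ['T'] => some "\\Tau".toList    | ['U'] => some "\\Upsilon".toList
  | ['F'] => some "\\Phi".toList    | ['C'] => some "\\Chi".toList
  | ['Y'] => some "\\Psi".toList    | ['W'] => some "\\Omega".toList
  | _ => none

def escKey : List Char := ['\\', '2', '5', '3']
def lrArrow : List Char := "\\leftrightarrow".toList

-- ===== PORT A =====
-- A's while loop over the mutable list atxt (elements = Python strings = List Char).
-- fuel = atxt.length bounds the iteration count exactly (i grows by 1 each pass);
-- text[i:i+4] is ported as (text.drop i).take 4, exact for the Nat index i.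
def loopA (fuel : Nat) (text : List Char) (atxt : List (List Char)) (i : Nat) (greek : Bool) :
    List (List Char) :=
  match fuel with
  | 0 => atxt
  | fuel + 1 =>
    if i < atxt.length then
      let c := atxt.getD i []
      if c = ['['] then loopA fuel text (atxt.set i ['{']) (i+1) true
      else if c = [']'] then loopA fuel text (atxt.set i ['}']) (i+1) false
      else if greek ∧ (greekTable c).isSome then
        loopA fuel text (atxt.set i ((greekTable c).getD [])) (i+1) greek
      else if greek ∧ (text.drop i).take 4 = escKey then
        loopA fuel text (atxt.take i ++ [lrArrow, [], [], []] ++ atxt.drop (i+4)) (i+1) greek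
      else if c = ['_'] then loopA fuel text (atxt.set i "_\\mathrm{".toList) (i+1) greek
      else if c = ['^'] then loopA fuel text (atxt.set i "^\\mathrm{".toList) (i+1) greek
      else if c = ['!'] then loopA fuel text (atxt.set i ['}']) (i+1) greek
      else if c = ['%'] then loopA fuel text (atxt.set i "\\%".toList) (i+1) greek
      else if c = ['#'] then loopA fuel text (atxt.set i "\\#".toList) (i+1) greek
      else if c = ['°'] then loopA fuel text (atxt.set i "^{\\circ}".toList) (i+1) greek
      else if c = [' '] then loopA fuel text (atxt.set i "\\,".toList) (i+1) greek
      else loopA fuel text atxt (i+1) greek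
    else atxt

def hm2latex (text : String) : String :=
  String.ofList (PySem.Chars.join []
    (loopA (List.map (fun c => [c]) text.toList).length text.toList
      (List.map (fun c => [c]) text.toList) 0 false))

-- ===== PORT B =====
-- Source B's common dict: the transforms that apply in and out of greek mode (default: the char itself).
def commonMap (c : Char) : List Char :=
  if c = '_' then "_\\mathrm{".toList
  else if c = '^' then "^\\mathrm{".toList
  else if c = '!' then ['}']
  else if c = '%' then "\\%".toList
  else if c = '#' then "\\#".toList
  else if c = '°' then "^{\\circ}".toList
  else if c = ' ' then "\\,".toList
  else [c]

-- greek_ch.get(c, common.get(c, c))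
def greekChar (c : Char) : List Char := (greekTable [c]).getD (commonMap c)

-- seg.split('\\253'): Python str.split for the fixed 4-char separator (leftmost,
-- non-overlapping matches; empty pieces kept; [''] on the empty string) — exact.
def splitEsc (s : List Char) : List (List Char) :=
  match s with
  | [] => [[]]
  | c :: rest =>
    if List.take 4 (c :: rest) = escKey then
      [] :: splitEsc (rest.drop 3)
    else
      match splitEsc rest with
      | [] => [[c]]   -- unreachable: splitEsc never returns []
      | p :: ps => (c :: p) :: ps
  termination_by s.length
  decreasing_by all_goals (simp [List.length_drop]; try omega)

-- r'\leftrightarrow'.join(parts)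
def joinLR : List (List Char) → List Char
  | [] => []
  | [p] => p
  | p :: q :: ps => p ++ lrArrow ++ joinLR (q :: ps)

-- plain(seg)
def plainSeg (s : List Char) : List Char := (s.map commonMap).flatten
-- greekify(seg)
def greekSeg (s : List Char) : List Char :=
  joinLR ((splitEsc s).map (fun p => (p.map greekChar).flatten))
-- greekify(seg) if greek else plain(seg)
def transSeg (greek : Bool) (s : List Char) : List Char :=
  if greek then greekSeg s else plainSeg s

-- the body of Source B's for loop; state = (out flattened, greek, buffered segment)
def stepB (st : List Char × Bool × List Char) (c : Char) : List Char × Bool × List Char :=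
  let (out, greek, seg) := st
  if c = '[' ∨ c = ']' then
    (out ++ transSeg greek seg ++ (if c = '[' then ['{'] else ['}']), c = '[', [])
  else (out, greek, seg ++ [c])

def hm2latex_alt (text : String) : String :=
  let st := text.toList.foldl stepB ([], false, [])
  String.ofList (st.1 ++ transSeg st.2.1 st.2.2)

-- ===== PRECONDITION & SPEC =====
def Spec_hm2latex (text : String) (out : String) : Prop := out = hm2latex_alt text
instance (text : String) (out : String) : Decidable (Spec_hm2latex text out) := by unfold Spec_hm2latex; infer_instance

-- ===== CLAIM (what is proved, stated in full; the proofs are below) =====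
def Claim_equal_hm2latex : Prop := ∀ (text : String), Dom_hm2latex text → Spec_hm2latex text (hm2latex text)

-- ===== LEMMAS AND PROOFS =====

-- Proof-side intermediate: a character transducer; A's loop and B's staged pipeline
-- are both proved equal to it.
def loopB (s : List Char) (greek : Bool) : List (List Char) :=
  match s with
  | [] => []
  | c :: rest =>
    if c = '[' then ['{'] :: loopB rest true
    else if c = ']' then ['}'] :: loopB rest false
    else if greek ∧ (greekTable [c]).isSome then
      ((greekTable [c]).getD []) :: loopB rest greek
    else if greek ∧ (c :: rest).take 4 = escKey then
      lrArrow :: loopB (rest.drop 3) greek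
    else if c = '_' then "_\\mathrm{".toList :: loopB rest greek
    else if c = '^' then "^\\mathrm{".toList :: loopB rest greek
    else if c = '!' then ['}'] :: loopB rest greek
    else if c = '%' then "\\%".toList :: loopB rest greek
    else if c = '#' then "\\#".toList :: loopB rest greek
    else if c = '°' then "^{\\circ}".toList :: loopB rest greek
    else if c = ' ' then "\\,".toList :: loopB rest greek
    else [c] :: loopB rest greek
  termination_by s.length
  decreasing_by all_goals (simp [List.length_drop]; try omega)

theorem join_nil_flatten (ps : List (List Char)) : PySem.Chars.join [] ps = ps.flatten := by
  induction ps with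
  | nil => rfl
  | cons h t ih =>
    cases t with
    | nil => simp [PySem.Chars.join_singleton]
    | cons h2 t2 => simp_all [PySem.Chars.join_cons_cons]

theorem loopA_terminal (f : Nat) (text : List Char) (atxt : List (List Char)) (i : Nat)
    (greek : Bool) (h : atxt.length ≤ i) : loopA f text atxt i greek = atxt := by
  cases f with
  | zero => rfl
  | succ f => simp [loopA, Nat.not_lt.mpr h]

theorem getD_mid (d : List (List Char)) (x : List Char) (l : List (List Char)) :
    (d ++ x :: l).getD d.length [] = x := by simp [List.getD]

theorem set_mid (d : List (List Char)) (x tok : List Char) (l : List (List Char)) :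
    (d ++ x :: l).set d.length tok = d ++ tok :: l := by simp

theorem drop_succ_of_drop_cons (text : List Char) (n : Nat) (c : Char) (s : List Char)
    (h : text.drop n = c :: s) : text.drop (n + 1) = s := by
  have := congrArg (List.drop 1) h
  simpa [List.drop_drop, Nat.add_comm] using this

theorem step_shape (f : Nat) (text s' : List Char) (done : List (List Char)) (tok : List Char)
    (g' : Bool)
    (ih : (loopA f text ((done ++ [tok]) ++ s'.map (fun c => [c])) (done ++ [tok]).length g').flatten
          = (done ++ [tok]).flatten ++ (loopB s' g').flatten) :
    (loopA f text (done ++ tok :: s'.map (fun c => [c])) (done.length + 1) g').flatten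
      = done.flatten ++ (tok ++ (loopB s' g').flatten) := by
  rw [show done ++ tok :: s'.map (fun c => [c]) = (done ++ [tok]) ++ s'.map (fun c => [c]) by simp,
      show done.length + 1 = (done ++ [tok]).length by simp, ih]
  simp

theorem pad_steps (p : List Char) : ∀ (f : Nat) (text rest : List Char)
    (done tail : List (List Char)) (greek : Bool),
    text.drop done.length = p ++ rest → (∀ c ∈ p, c ≠ '\\') →
    loopA (p.length + f) text (done ++ (p.map fun _ => ([] : List Char)) ++ tail) done.length greek
      = loopA f text (done ++ (p.map fun _ => ([] : List Char)) ++ tail) (done.length + p.length)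
          greek := by
  induction p with
  | nil => intro f text rest done tail greek _ _; simp
  | cons c p' ih =>
    intro f text rest done tail greek ht hp
    have hc : c ≠ '\\' := hp c (by simp)
    have hl : done ++ ((c :: p').map fun _ => ([] : List Char)) ++ tail
        = (done ++ [[]]) ++ (p'.map fun _ => ([] : List Char)) ++ tail := by simp
    have ht2 : text.drop (done.length + 1) = p' ++ rest :=
      drop_succ_of_drop_cons _ _ _ _ (by simpa using ht)
    rw [hl]
    rw [show (c :: p').length + f = (p'.length + f) + 1 by simp only [List.length_cons]; omega]
    rw [show done ++ [([] : List Char)] ++ (p'.map fun _ => ([] : List Char)) ++ tail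
        = done ++ ([] : List Char) :: ((p'.map fun _ => ([] : List Char)) ++ tail) by simp]
    simp only [loopA]
    rw [if_pos (by simp)]
    rw [getD_mid, ht]
    rw [if_neg (by simp), if_neg (by simp),
        if_neg (by rintro ⟨-, hg⟩; simp [show greekTable ([] : List Char) = none from rfl] at hg),
        if_neg (by
          rintro ⟨-, hw⟩
          have hw' : c :: List.take 3 (p' ++ rest) = ['\\', '2', '5', '3'] := hw
          simp only [List.cons.injEq] at hw'
          exact hc hw'.1),
        if_neg (by simp), if_neg (by simp), if_neg (by simp), if_neg (by simp),
        if_neg (by simp), if_neg (by simp), if_neg (by simp)]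
    have := ih f text rest (done ++ [[]]) tail greek (by simpa using ht2) (fun d hd => hp d (by simp [hd]))
    rw [show done ++ ([] : List Char) :: ((p'.map fun _ => ([] : List Char)) ++ tail)
        = (done ++ [[]]) ++ (p'.map fun _ => ([] : List Char)) ++ tail by simp]
    rw [show done.length + 1 = (done ++ [([] : List Char)]).length by simp]
    rw [this]
    rw [show (done ++ [([] : List Char)]).length + p'.length = done.length + (c :: p').length by
      simp only [List.length_append, List.length_cons, List.length_nil]; omega]

theorem main_invariant (fuel : Nat) :
    ∀ (text s : List Char) (done : List (List Char)) (greek : Bool),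
      text.drop done.length = s → s.length ≤ fuel →
      (loopA fuel text (done ++ s.map (fun c => [c])) done.length greek).flatten
        = done.flatten ++ (loopB s greek).flatten := by
  induction fuel using Nat.strong_induction_on with
  | _ fuel IH =>
  intro text s done greek ht hf
  cases s with
  | nil =>
    rw [List.map_nil, List.append_nil, loopA_terminal _ _ _ _ _ (Nat.le_refl _)]
    simp [loopB]
  | cons ch s' =>
    obtain ⟨f, rfl⟩ : ∃ f, fuel = f + 1 := ⟨fuel - 1, by simp at hf; omega⟩
    have ht' : text.drop (done.length + 1) = s' := drop_succ_of_drop_cons _ _ _ _ ht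
    have hf' : s'.length ≤ f := by simp at hf; omega
    have hIH := IH f (by omega) text s'
    simp only [List.map_cons, loopA, loopB]
    rw [if_pos (by simp)]
    rw [getD_mid, ht]
    by_cases h : ch = '['
    · subst h
      rw [if_pos rfl, if_pos rfl, set_mid,
          step_shape f text s' done ['{'] true (hIH (done ++ [['{']]) true (by simpa using ht') hf')]
      simp
    rw [if_neg (by simp [h]), if_neg h]
    by_cases h : ch = ']'
    · subst h
      rw [if_pos rfl, if_pos rfl, set_mid,
          step_shape f text s' done ['}'] false (hIH (done ++ [['}']]) false (by simpa using ht') hf')]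
      simp
    rw [if_neg (by simp [h]), if_neg h]
    by_cases h3 : greek = true ∧ (greekTable [ch]).isSome = true
    · rw [if_pos h3, if_pos h3, set_mid,
          step_shape f text s' done ((greekTable [ch]).getD []) greek
            (hIH (done ++ [(greekTable [ch]).getD []]) greek (by simpa using ht') hf')]
      simp
    rw [if_neg h3, if_neg h3]
    by_cases h4 : greek = true ∧ List.take 4 (ch :: s') = escKey
    · obtain ⟨hg, hw⟩ := h4
      rcases s' with _ | ⟨c2, _ | ⟨c3, _ | ⟨c4, s4⟩⟩⟩
      · exact absurd (congrArg List.length hw) (by simp [escKey])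
      · exact absurd (congrArg List.length hw) (by simp [escKey])
      · exact absurd (congrArg List.length hw) (by simp [escKey])
      have hw'' : ch = '\\' ∧ c2 = '2' ∧ c3 = '5' ∧ c4 = '3' := by
        have h0 : ch :: c2 :: c3 :: c4 :: List.take 0 s4 = ['\\', '2', '5', '3'] := hw
        simp at h0
        exact h0
      obtain ⟨rfl, rfl, rfl, rfl⟩ := hw''
      rw [if_pos ⟨hg, hw⟩, if_pos ⟨hg, hw⟩]
      rw [List.take_left]
      rw [show List.drop (done.length + 4)
            (done ++ ['\\'] :: List.map (fun c => [c]) ('2' :: '5' :: '3' :: s4))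
          = List.map (fun c => [c]) s4 from by
        simpa using List.drop_length_add_append (l₁ := done)
          (l₂ := ['\\'] :: List.map (fun c => [c]) ('2' :: '5' :: '3' :: s4)) 4]
      have hd4 : text.drop (done.length + 4) = s4 := by
        rw [show done.length + 4 = done.length + 1 + 1 + 1 + 1 from by omega]
        exact drop_succ_of_drop_cons _ _ _ _ (drop_succ_of_drop_cons _ _ _ _
          (drop_succ_of_drop_cons _ _ _ _ (by simpa using ht')))
      obtain ⟨f2, rfl⟩ : ∃ f2, f = 3 + f2 := ⟨f - 3, by simp at hf; omega⟩
      rw [show done ++ [lrArrow, [], [], []] ++ List.map (fun c => [c]) s4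
          = (done ++ [lrArrow]) ++ (['2', '5', '3'].map fun _ => ([] : List Char))
              ++ List.map (fun c => [c]) s4 from by simp]
      rw [show done.length + 1 = (done ++ [lrArrow]).length from by simp]
      rw [show (3 : Nat) + f2 = (['2', '5', '3'] : List Char).length + f2 from by simp]
      rw [pad_steps ['2', '5', '3'] f2 text s4 (done ++ [lrArrow])
            (List.map (fun c => [c]) s4) greek (by simpa using ht') (by intro d hd; fin_cases hd <;> decide)]
      rw [show (done ++ [lrArrow]).length + (['2', '5', '3'] : List Char).length
          = ((done ++ [lrArrow]) ++ (['2', '5', '3'].map fun _ => ([] : List Char))).length from by simp]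
      rw [IH f2 (by omega) text s4
            ((done ++ [lrArrow]) ++ (['2', '5', '3'].map fun _ => ([] : List Char))) greek
            (by simpa using hd4) (by simp at hf; omega)]
      simp
    rw [if_neg h4, if_neg h4]
    by_cases h : ch = '_'
    · subst h
      rw [if_pos rfl, if_pos rfl, set_mid,
          step_shape f text s' done "_\\mathrm{".toList greek (hIH (done ++ ["_\\mathrm{".toList]) greek (by simpa using ht') hf')]
      simp
    rw [if_neg (by simp [h]), if_neg h]
    by_cases h : ch = '^'
    · subst h
      rw [if_pos rfl, if_pos rfl, set_mid,
          step_shape f text s' done "^\\mathrm{".toList greek (hIH (done ++ ["^\\mathrm{".toList]) greek (by simpa using ht') hf')]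
      simp
    rw [if_neg (by simp [h]), if_neg h]
    by_cases h : ch = '!'
    · subst h
      rw [if_pos rfl, if_pos rfl, set_mid,
          step_shape f text s' done ['}'] greek (hIH (done ++ [['}']]) greek (by simpa using ht') hf')]
      simp
    rw [if_neg (by simp [h]), if_neg h]
    by_cases h : ch = '%'
    · subst h
      rw [if_pos rfl, if_pos rfl, set_mid,
          step_shape f text s' done "\\%".toList greek (hIH (done ++ ["\\%".toList]) greek (by simpa using ht') hf')]
      simp
    rw [if_neg (by simp [h]), if_neg h]
    by_cases h : ch = '#'
    · subst h
      rw [if_pos rfl, if_pos rfl, set_mid,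
          step_shape f text s' done "\\#".toList greek (hIH (done ++ ["\\#".toList]) greek (by simpa using ht') hf')]
      simp
    rw [if_neg (by simp [h]), if_neg h]
    by_cases h : ch = '°'
    · subst h
      rw [if_pos rfl, if_pos rfl, set_mid,
          step_shape f text s' done "^{\\circ}".toList greek (hIH (done ++ ["^{\\circ}".toList]) greek (by simpa using ht') hf')]
      simp
    rw [if_neg (by simp [h]), if_neg h]
    by_cases h : ch = ' '
    · subst h
      rw [if_pos rfl, if_pos rfl, set_mid,
          step_shape f text s' done "\\,".toList greek (hIH (done ++ ["\\,".toList]) greek (by simpa using ht') hf')]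
      simp
    rw [if_neg (by simp [h]), if_neg h]
    rw [step_shape f text s' done [ch] greek (hIH (done ++ [[ch]]) greek (by simpa using ht') hf')]
    simp

-- ===== bridge: loopB = B's staged pipeline =====

theorem splitEsc_ne_nil (s : List Char) : splitEsc s ≠ [] := by
  cases s with
  | nil => simp [splitEsc]
  | cons c rest =>
    rw [splitEsc]
    split
    · simp
    · split <;> simp

theorem joinLR_cons (p : List Char) (ps : List (List Char)) (h : ps ≠ []) :
    joinLR (p :: ps) = p ++ lrArrow ++ joinLR ps := by
  cases ps with
  | nil => exact absurd rfl h
  | cons q ps' => rfl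

theorem joinLR_head_append (a p : List Char) (ps : List (List Char)) :
    joinLR ((a ++ p) :: ps) = a ++ joinLR (p :: ps) := by
  cases ps with
  | nil => rfl
  | cons q ps' => simp [joinLR]

theorem greekSeg_nil : greekSeg [] = [] := by
  unfold greekSeg
  rw [splitEsc]
  rfl

theorem greekSeg_esc (s : List Char) (h : s.take 4 = escKey) :
    greekSeg s = lrArrow ++ greekSeg (s.drop 4) := by
  cases s with
  | nil => exact absurd (congrArg List.length h) (by simp [escKey])
  | cons c rest =>
    unfold greekSeg
    rw [show splitEsc (c :: rest) = [] :: splitEsc (rest.drop 3) from by rw [splitEsc, if_pos h]]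
    rw [List.map_cons]
    rw [joinLR_cons _ _ (by
      simp only [ne_eq, List.map_eq_nil_iff]
      exact splitEsc_ne_nil _)]
    simp

theorem greekSeg_cons (c : Char) (s : List Char) (h : (c :: s).take 4 ≠ escKey) :
    greekSeg (c :: s) = greekChar c ++ greekSeg s := by
  unfold greekSeg
  rw [show splitEsc (c :: s) = match splitEsc s with
        | [] => [[c]] | p :: ps => (c :: p) :: ps from by rw [splitEsc, if_neg h]]
  rcases hs : splitEsc s with _ | ⟨p, ps⟩
  · exact absurd hs (splitEsc_ne_nil s)
  · simp only [List.map_cons, List.flatten_cons]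
    rw [joinLR_head_append]

theorem plainSeg_cons (c : Char) (s : List Char) :
    plainSeg (c :: s) = commonMap c ++ plainSeg s := by simp [plainSeg]

theorem transSeg_nil (greek : Bool) : transSeg greek [] = [] := by
  cases greek <;> simp [transSeg, plainSeg, greekSeg_nil]

-- after the bracket and greek branches are excluded, loopB emits exactly commonMap c
theorem loopB_common (c : Char) (rest : List Char) (greek : Bool)
    (h1 : c ≠ '[') (h2 : c ≠ ']')
    (h3 : ¬ (greek = true ∧ (greekTable [c]).isSome = true))
    (h4 : ¬ (greek = true ∧ (c :: rest).take 4 = escKey)) :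
    loopB (c :: rest) greek = commonMap c :: loopB rest greek := by
  rw [loopB, if_neg h1, if_neg h2, if_neg h3, if_neg h4]
  unfold commonMap
  split_ifs <;> rfl

-- crossing argument: a matched escape window never reaches a bracket
theorem take4_localize (l t : List Char) (b : Char) (t' : List Char)
    (ht : t = b :: t') (hb : b = '[' ∨ b = ']')
    (h : (l ++ t).take 4 = escKey) : l.take 4 = escKey ∧ 4 ≤ l.length := by
  by_cases hlen : 4 ≤ l.length
  · constructor
    · rw [List.take_append_of_le_length hlen] at h; exact h
    · exact hlen
  · exfalso
    push_neg at hlen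
    subst ht
    rcases hb with rfl | rfl <;>
    · rcases l with _ | ⟨a1, _ | ⟨a2, _ | ⟨a3, _ | ⟨a4, l'⟩⟩⟩⟩
      · simp [escKey] at h
      · simp [escKey] at h
      · simp [escKey] at h
      · simp [escKey] at h
      · have hlen' := hlen; simp only [List.length_cons] at hlen'; omega

-- loopB over a bracket-free prefix = transSeg of that prefix, when what follows
-- is empty or starts with a bracket (so no escape window crosses the boundary)
theorem loopB_prefix (n : Nat) : ∀ (pre t : List Char) (greek : Bool),
    pre.length ≤ n →
    (∀ c ∈ pre, c ≠ '[' ∧ c ≠ ']') →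
    (t = [] ∨ ∃ b t', t = b :: t' ∧ (b = '[' ∨ b = ']')) →
    (loopB (pre ++ t) greek).flatten = transSeg greek pre ++ (loopB t greek).flatten := by
  induction n with
  | zero =>
    intro pre t greek hn _ _
    have : pre = [] := List.eq_nil_of_length_eq_zero (by omega)
    subst this; simp [transSeg_nil]
  | succ n IH =>
    intro pre t greek hn hpre hbrk
    cases pre with
    | nil => simp [transSeg_nil]
    | cons c pre' =>
      have hc := hpre c (by simp)
      have hpre' : ∀ d ∈ pre', d ≠ '[' ∧ d ≠ ']' := fun d hd => hpre d (by simp [hd])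
      have hn' : pre'.length ≤ n := by simp at hn; omega
      by_cases hg : greek = true ∧ (greekTable [c]).isSome = true
      · -- greek letter
        have hcs : c ≠ '\\' := by
          intro he; subst he
          have := hg.2
          simp [show greekTable ['\\'] = none from rfl] at this
        obtain ⟨hgt, hsome⟩ := hg
        subst hgt
        rw [List.cons_append, loopB, if_neg hc.1, if_neg hc.2, if_pos ⟨rfl, hsome⟩]
        have hnk : (c :: pre').take 4 ≠ escKey := by
          intro he
          have : c = '\\' := by
            cases pre' <;> simp [escKey] at he <;> tauto
          exact hcs this
        rw [show transSeg true (c :: pre') = greekChar c ++ greekSeg pre' from by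
          simpa [transSeg] using greekSeg_cons c pre' hnk]
        rw [List.flatten_cons, IH pre' t true hn' hpre' hbrk]
        simp [transSeg, greekChar]
        cases hgt2 : greekTable [c] with
        | none => rw [hgt2] at hsome; simp at hsome
        | some v => simp
      · by_cases hesc : greek = true ∧ ((c :: pre') ++ t).take 4 = escKey
        · obtain ⟨hgt, hwin⟩ := hesc
          subst hgt
          -- the window lies inside the bracket-free prefix
          have hloc : (c :: pre').take 4 = escKey ∧ 4 ≤ (c :: pre').length := by
            rcases hbrk with rfl | ⟨b, t', rfl, hb⟩
            · constructor
              · simpa using hwin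
              · have := congrArg List.length hwin
                simp [escKey] at this ⊢
                omega
            · exact take4_localize _ _ b t' rfl hb hwin
          obtain ⟨hkey, hlen⟩ := hloc
          rw [List.cons_append, loopB, if_neg hc.1, if_neg hc.2, if_neg hg,
              if_pos ⟨rfl, by rwa [← List.cons_append]⟩]
          have hlen' : 3 ≤ pre'.length := by simp at hlen; omega
          rw [show (pre' ++ t).drop 3 = pre'.drop 3 ++ t from
            List.drop_append_of_le_length hlen']
          rw [List.flatten_cons,
              IH (pre'.drop 3) t true (by simp; omega)
                (fun d hd => hpre' d (List.mem_of_mem_drop hd)) hbrk]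
          rw [show transSeg true (c :: pre') = lrArrow ++ greekSeg ((c :: pre').drop 4) from by
            simpa [transSeg] using greekSeg_esc (c :: pre') hkey]
          simp [transSeg]
        · -- common branch
          have h4 : ¬ (greek = true ∧ ((c :: pre') ++ t).take 4 = escKey) := hesc
          rw [List.cons_append]
          rw [loopB_common c (pre' ++ t) greek hc.1 hc.2 hg (by rwa [← List.cons_append])]
          rw [List.flatten_cons, IH pre' t greek hn' hpre' hbrk]
          have htr : transSeg greek (c :: pre') = commonMap c ++ transSeg greek pre' := by
            cases greek with
            | false => simp [transSeg, plainSeg_cons]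
            | true =>
              have hnk : (c :: pre').take 4 ≠ escKey := by
                intro he
                rcases hbrk with rfl | ⟨b, t', rfl, hb⟩
                · exact hesc ⟨rfl, by simpa using he⟩
                · have hlen : 4 ≤ (c :: pre').length := by
                    have := congrArg List.length he
                    simp [escKey] at this ⊢
                    omega
                  exact hesc ⟨rfl, by rw [List.take_append_of_le_length hlen]; exact he⟩
              have hnone : greekTable [c] = none := by
                cases hgt : greekTable [c] with
                | none => rfl
                | some v => exact absurd ⟨rfl, by simp [hgt]⟩ hg
              rw [show transSeg true (c :: pre') = greekChar c ++ greekSeg pre' from by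
                simpa [transSeg] using greekSeg_cons c pre' hnk]
              simp [greekChar, hnone, transSeg]
          rw [htr]
          simp

-- Source B's main loop, as a recursion (the foldl below unfolds to this)
def glue (greek : Bool) (seg : List Char) : List Char → List Char
  | [] => transSeg greek seg
  | c :: s =>
    if c = '[' ∨ c = ']' then
      transSeg greek seg ++ (if c = '[' then ['{'] else ['}']) ++ glue (c = '[') [] s
    else glue greek (seg ++ [c]) s

theorem fold_glue (s : List Char) : ∀ (out seg : List Char) (greek : Bool),
    (s.foldl stepB (out, greek, seg)).1
      ++ transSeg (s.foldl stepB (out, greek, seg)).2.1 (s.foldl stepB (out, greek, seg)).2.2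
      = out ++ glue greek seg s := by
  induction s with
  | nil => intro out seg greek; simp [glue]
  | cons c s' IH =>
    intro out seg greek
    simp only [List.foldl_cons]
    by_cases hb : c = '[' ∨ c = ']'
    · rw [show stepB (out, greek, seg) c
          = (out ++ transSeg greek seg ++ (if c = '[' then ['{'] else ['}']),
             decide (c = '['), ([] : List Char)) from by
        simp [stepB, hb]]
      rw [IH, glue, if_pos hb]
      simp
    · rw [show stepB (out, greek, seg) c = (out, greek, seg ++ [c]) from by
        simp [stepB, hb]]
      rw [IH, glue, if_neg hb]

theorem glue_loopB (s : List Char) : ∀ (seg : List Char) (greek : Bool),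
    (∀ c ∈ seg, c ≠ '[' ∧ c ≠ ']') →
    glue greek seg s = (loopB (seg ++ s) greek).flatten := by
  induction s with
  | nil =>
    intro seg greek hseg
    rw [glue]
    have := loopB_prefix seg.length seg [] greek (Nat.le_refl _) hseg (Or.inl rfl)
    simp [loopB] at this
    simpa using this.symm
  | cons c s' IH =>
    intro seg greek hseg
    by_cases hb : c = '[' ∨ c = ']'
    · rcases hb with rfl | rfl
      · have hpfx := loopB_prefix seg.length seg ('[' :: s') greek (Nat.le_refl _) hseg
          (Or.inr ⟨'[', s', rfl, Or.inl rfl⟩)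
        rw [glue, if_pos (Or.inl rfl), hpfx]
        rw [show loopB ('[' :: s') greek = ['{'] :: loopB s' true from by rw [loopB]; simp]
        rw [List.flatten_cons]
        have hI := IH [] true (by simp)
        simp only [List.nil_append] at hI
        simp [hI]
      · have hpfx := loopB_prefix seg.length seg (']' :: s') greek (Nat.le_refl _) hseg
          (Or.inr ⟨']', s', rfl, Or.inr rfl⟩)
        rw [glue, if_pos (Or.inr rfl), hpfx]
        rw [show loopB (']' :: s') greek = ['}'] :: loopB s' false from by
          rw [loopB]
          have hne : (']' : Char) ≠ '[' := by decide
          rw [if_neg hne, if_pos rfl]]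
        rw [List.flatten_cons]
        have hI := IH [] false (by simp)
        simp only [List.nil_append] at hI
        simp [hI]
    · rw [glue, if_neg hb]
      rw [IH (seg ++ [c]) greek (by
        intro d hd
        rcases List.mem_append.mp hd with h | h
        · exact hseg d h
        · simp at h; subst h; push_neg at hb; exact hb)]
      simp

-- ===== VERDICT (by name: the statement is the Claim_ definition above) =====
theorem hm2latex_spec : Claim_equal_hm2latex := by
  intro text _
  unfold Spec_hm2latex
  simp only [hm2latex, hm2latex_alt]
  have hA := main_invariant (List.map (fun c => [c]) text.toList).length text.toList
      text.toList [] false rfl (by simp)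
  simp only [List.length_nil, List.nil_append, List.flatten_nil] at hA
  have hB := fold_glue text.toList [] [] false
  simp only [List.nil_append] at hB
  have hBL := glue_loopB text.toList [] false (by simp)
  simp only [List.nil_append] at hBL
  rw [join_nil_flatten, hA, ← hBL, ← hB]
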